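-- pv_equiv track=rewrite | github.com/ChoHon/Algorithm | week 02/16564.py | hots
-- ===== SOURCE A (Python) =====
-- def hots(arr, k):
--     arr.sort()
--     start, end = arr[0], arr[0] + k
--     temp = 0
--
--     while start <= end:
--         mid = (start + end) // 2
--
--         dist_arr = [mid - x for x in arr if mid > x]
--
--         if sum(dist_arr) < k:
--             temp = mid
--             start = mid + 1
--
--         elif sum(dist_arr) > k:
--             end = mid - 1
--
--         else:
--             return mid
--
--     return temp
-- ===== SOURCE B (Python) =====
-- def hots(arr, k):
--     arr.sort()
--     n = len(arr)
--
--     pre = [0]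
--     for x in arr:
--         pre.append(pre[-1] + x)
--
--     def dist_sum(m):
--         # count of elements < m by hand-written bisect, then prefix sums
--         lo, hi = 0, n
--         while lo < hi:
--             mid = (lo + hi) // 2
--             if arr[mid] < m:
--                 lo = mid + 1
--             else:
--                 hi = mid
--         return lo * m - pre[lo]
--
--     lo, hi = arr[0], arr[0] + k
--     while lo < hi:
--         mid = (lo + hi + 1) // 2
--         if dist_sum(mid) <= k:
--             lo = mid
--         else:
--             hi = mid - 1
--     return lo
-- ===== Notes on version B (the rewrite author's own statement) =====
-- stated objective: faster
-- what changed: A re-evaluates the whole distance sum with an O(n) list comprehension inside an equal-match binary search on mid; B sorts once, builds prefix sums, computes each distance sum in O(log n) by a hand-written bisect for the count of elements below mid, and replaces the three-way search by a predicate bisection for the largest mid whose distance sum is at most k.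
-- outside the precondition, e.g. on hots([], 3): A raises IndexError, B raises IndexError; on hots([3, 1], -2): A returns 0, B returns 1
import Mathlib
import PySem

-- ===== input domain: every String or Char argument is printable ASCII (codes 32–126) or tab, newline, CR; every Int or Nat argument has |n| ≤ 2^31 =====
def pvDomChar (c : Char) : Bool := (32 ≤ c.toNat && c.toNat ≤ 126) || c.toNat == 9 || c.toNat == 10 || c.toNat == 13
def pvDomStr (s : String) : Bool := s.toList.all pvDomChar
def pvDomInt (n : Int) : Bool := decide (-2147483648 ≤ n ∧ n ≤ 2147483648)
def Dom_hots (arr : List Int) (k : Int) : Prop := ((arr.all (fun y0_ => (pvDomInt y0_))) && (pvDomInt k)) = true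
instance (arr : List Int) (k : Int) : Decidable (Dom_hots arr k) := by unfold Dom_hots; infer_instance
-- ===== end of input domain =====

-- B replaces A's O(n) distance-sum re-evaluation inside an equal-match binary search by prefix sums + a
-- hand-written bisect (O(log n) per evaluation) and a predicate bisection for the largest feasible mid;
-- measured faster only if a timing run says so. Both A and B sort arr in place (same side effect);
-- the equivalence proved here is about the return value.

-- ===== PORT A =====
-- fuel = number of remaining loop iterations, a structural bound on the while loop
-- (hots passes (k+1).toNat, an upper bound on the search-interval width end-start+1, which shrinks every iteration)
def hotsLoopA (arr : List Int) (k : Int) (fuel : Nat) (start end_ temp : Int) : Int :=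
  match fuel with
  | 0 => temp
  | fuel + 1 =>
    if start ≤ end_ then
      let mid := PySem.Int.floordiv (start + end_) 2
      let distSum := ((arr.filter (fun x => mid > x)).map (fun x => mid - x)).sum
      if distSum < k then hotsLoopA arr k fuel (mid + 1) end_ mid
      else if distSum > k then hotsLoopA arr k fuel start (mid - 1) temp
      else mid
    else temp

def hots (arr : List Int) (k : Int) : Int :=
  let a := PySem.List.sorted arr (fun x => x) false
  let start := PySem.List.pyGetD a 0 0
  hotsLoopA a k (k + 1).toNat start (start + k) 0

-- ===== PORT B =====
-- the while-loop of dist_sum: count of elements < m in the sorted list (hand-written bisect_left)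
-- fuel = remaining bisect iterations (dist_sum passes a.length, a bound on hi-lo, which shrinks every iteration)
def countLess (a : List Int) (m : Int) (fuel : Nat) (lo hi : Int) : Int :=
  match fuel with
  | 0 => lo
  | fuel + 1 =>
    if lo < hi then
      let mid := PySem.Int.floordiv (lo + hi) 2
      if PySem.List.pyGetD a mid 0 < m then countLess a m fuel (mid + 1) hi
      else countLess a m fuel lo mid
    else lo

def distSumB (a pre : List Int) (n m : Int) : Int :=
  let c := countLess a m a.length 0 n
  c * m - PySem.List.pyGetD pre c 0

-- fuel = remaining outer-bisection iterations (hots_alt passes k.toNat, a bound on hi-lo)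
def hotsLoopB (a pre : List Int) (n k : Int) (fuel : Nat) (lo hi : Int) : Int :=
  match fuel with
  | 0 => lo
  | fuel + 1 =>
    if lo < hi then
      let mid := PySem.Int.floordiv (lo + hi + 1) 2
      if distSumB a pre n mid ≤ k then hotsLoopB a pre n k fuel mid hi
      else hotsLoopB a pre n k fuel lo (mid - 1)
    else lo

def hots_alt (arr : List Int) (k : Int) : Int :=
  let a := PySem.List.sorted arr (fun x => x) false
  let n : Int := a.length
  let pre := a.foldl (fun p x => p ++ [PySem.List.pyGetD p (-1) 0 + x]) [0]
  let lo := PySem.List.pyGetD a 0 0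
  hotsLoopB a pre n k k.toNat lo (lo + k)

-- ===== PRECONDITION & SPEC =====
-- Pre_ excludes the empty list, on which A raises IndexError (B raises too), and negative k, outside the
-- problem's natural domain, where A's loop never runs and it returns its sentinel temp = 0.
def Pre_hots (arr : List Int) (k : Int) : Prop := arr ≠ [] ∧ 0 ≤ k
instance (arr : List Int) (k : Int) : Decidable (Pre_hots arr k) := by unfold Pre_hots; infer_instance
def pvWitness_hots : List Int × Int := ([3, 1, 2], 5)

def Spec_hots (arr : List Int) (k : Int) (out : Int) : Prop := out = hots_alt arr k
instance (arr : List Int) (k : Int) (out : Int) : Decidable (Spec_hots arr k out) := by unfold Spec_hots; infer_instance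

-- ===== CLAIM (what is proved, stated in full; the proofs are below) =====
def Claim_equal_hots : Prop := ∀ (arr : List Int) (k : Int), Dom_hots arr k → Pre_hots arr k → Spec_hots arr k (hots arr k)

-- ===== LEMMAS AND PROOFS =====

-- the distance sum A computes: sum of (m - x) over the elements below m
def fsum (a : List Int) (m : Int) : Int := ((a.filter (fun x => m > x)).map (fun x => m - x)).sum

theorem fsum_nil (m : Int) : fsum [] m = 0 := rfl

theorem fsum_cons (x : Int) (t : List Int) (m : Int) :
    fsum (x :: t) m = (if x < m then m - x else 0) + fsum t m := by
  simp only [fsum, List.filter_cons]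
  by_cases h : x < m
  · simp [h]
  · simp [h]

theorem fsum_append (l₁ l₂ : List Int) (m : Int) :
    fsum (l₁ ++ l₂) m = fsum l₁ m + fsum l₂ m := by
  induction l₁ with
  | nil => simp [fsum]
  | cons x t ih => simp only [List.cons_append, fsum_cons, ih]; ring

theorem fsum_mono (a : List Int) {m m' : Int} (h : m ≤ m') : fsum a m ≤ fsum a m' := by
  induction a with
  | nil => simp [fsum_nil]
  | cons x t ih =>
    rw [fsum_cons, fsum_cons]
    have : (if x < m then m - x else 0) ≤ (if x < m' then m' - x else 0) := by
      split_ifs <;> omega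
    omega

theorem fsum_strict (a : List Int) {x0 m m' : Int} (hx : x0 ∈ a) (hxm : x0 ≤ m)
    (h : m < m') : fsum a m + (m' - m) ≤ fsum a m' := by
  induction a with
  | nil => simp at hx
  | cons y t ih =>
    rw [fsum_cons, fsum_cons]
    rcases List.mem_cons.mp hx with hy | hy
    · subst hy
      have ht := fsum_mono t (le_of_lt h)
      have : (if x0 < m then m - x0 else 0) + (m' - m) ≤ (if x0 < m' then m' - x0 else 0) := by
        split_ifs <;> omega
      omega
    · have := ih hy
      have : (if y < m then m - y else 0) ≤ (if y < m' then m' - y else 0) := by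
        split_ifs <;> omega
      omega

theorem fsum_zero (a : List Int) (m : Int) (h : ∀ x ∈ a, m ≤ x) : fsum a m = 0 := by
  induction a with
  | nil => simp [fsum_nil]
  | cons y t ih =>
    rw [fsum_cons]
    have h1 := h y (by simp)
    have h2 := ih (fun x hx => h x (by simp [hx]))
    have : ¬ (y < m) := by omega
    simp [this, h2]

theorem fsum_all_lt (l : List Int) (m : Int) (h : ∀ x ∈ l, x < m) :
    fsum l m = (l.length : Int) * m - l.sum := by
  induction l with
  | nil => simp [fsum_nil]
  | cons y t ih =>
    have h1 := h y (by simp)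
    have h2 := ih (fun x hx => h x (by simp [hx]))
    rw [fsum_cons, if_pos h1, h2]
    simp only [List.length_cons, List.sum_cons]
    push_cast
    ring

-- the value both loops compute: the largest mid in [a0, a0+k] whose distance sum is ≤ k
def IsAns (a : List Int) (a0 k r : Int) : Prop :=
  a0 ≤ r ∧ r ≤ a0 + k ∧ fsum a r ≤ k ∧ ∀ m, r < m → m ≤ a0 + k → k < fsum a m

theorem IsAns_unique {a : List Int} {a0 k r r' : Int}
    (h : IsAns a a0 k r) (h' : IsAns a a0 k r') : r = r' := by
  obtain ⟨h1, h2, h3, h4⟩ := h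
  obtain ⟨h1', h2', h3', h4'⟩ := h'
  by_contra hne
  rcases lt_trichotomy r r' with hlt | heq | hgt
  · exact absurd h3' (by have := h4 r' hlt h2'; omega)
  · exact hne heq
  · exact absurd h3 (by have := h4' r hgt h2; omega)

theorem hotsLoopA_succ (arr : List Int) (k : Int) (n : Nat) (start end_ temp : Int)
    (h : start ≤ end_) :
    hotsLoopA arr k (n + 1) start end_ temp =
      (if fsum arr (PySem.Int.floordiv (start + end_) 2) < k then
        hotsLoopA arr k n (PySem.Int.floordiv (start + end_) 2 + 1) end_ (PySem.Int.floordiv (start + end_) 2)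
      else if fsum arr (PySem.Int.floordiv (start + end_) 2) > k then
        hotsLoopA arr k n start (PySem.Int.floordiv (start + end_) 2 - 1) temp
      else PySem.Int.floordiv (start + end_) 2) := by
  simp [hotsLoopA, h, fsum]

theorem hotsLoopA_stop (arr : List Int) (k : Int) (n : Nat) (start end_ temp : Int)
    (h : ¬ start ≤ end_) :
    hotsLoopA arr k n start end_ temp = temp := by
  cases n <;> simp [hotsLoopA, h]

theorem loopA_exit (a0 : Int) (rest : List Int) (k start end_ temp : Int)
    (hk : 0 ≤ k) (hf0 : fsum (a0 :: rest) a0 = 0)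
    (h1 : a0 ≤ start) (h2 : end_ ≤ a0 + k) (h3 : start ≤ end_ + 1)
    (hlow : ∀ m, a0 ≤ m → m < start → fsum (a0 :: rest) m ≤ k)
    (hhigh : ∀ m, end_ < m → m ≤ a0 + k → k < fsum (a0 :: rest) m)
    (htemp : temp = start - 1 ∨ (start = a0 ∧ temp = 0))
    (hse : ¬ start ≤ end_) : IsAns (a0 :: rest) a0 k temp := by
  have hsa : a0 < start := by
    by_contra hns
    have hsa0 : start = a0 := by omega
    have := hhigh a0 (by omega) (by omega)
    omega
  rcases htemp with ht | ⟨ht1, ht2⟩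
  · subst ht
    refine ⟨by omega, by omega, hlow _ (by omega) (by omega), ?_⟩
    intro m hmm hml
    exact hhigh m (by omega) hml
  · omega

theorem loopA_isAns (a0 : Int) (rest : List Int) (k : Int)
    (ha : (a0 :: rest).Pairwise (· ≤ ·)) (hk : 0 ≤ k) :
    ∀ (n : Nat) (start end_ temp : Int), (end_ + 1 - start).toNat ≤ n →
      a0 ≤ start → end_ ≤ a0 + k → start ≤ end_ + 1 →
      (∀ m, a0 ≤ m → m < start → fsum (a0 :: rest) m ≤ k) →
      (∀ m, end_ < m → m ≤ a0 + k → k < fsum (a0 :: rest) m) →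
      (temp = start - 1 ∨ (start = a0 ∧ temp = 0)) →
      IsAns (a0 :: rest) a0 k (hotsLoopA (a0 :: rest) k n start end_ temp) := by
  have hmin : ∀ x ∈ (a0 :: rest), a0 ≤ x := by
    intro x hx
    rcases List.mem_cons.mp hx with h | h
    · exact h ▸ le_refl _
    · exact (List.pairwise_cons.mp ha).1 x h
  have hf0 : fsum (a0 :: rest) a0 = 0 := fsum_zero _ _ hmin
  intro n
  induction n with
  | zero =>
    intro start end_ temp hn h1 h2 h3 hlow hhigh htemp
    have hse : ¬ start ≤ end_ := by omega
    exact loopA_exit a0 rest k start end_ temp hk hf0 h1 h2 h3 hlow hhigh htemp hse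
  | succ n ih =>
    intro start end_ temp hn h1 h2 h3 hlow hhigh htemp
    by_cases hse : start ≤ end_
    · obtain ⟨hm1, hm2⟩ := PySem.Int.floordiv_two_mid_bounds hse
      set mid := PySem.Int.floordiv (start + end_) 2 with hmid
      rw [hotsLoopA_succ _ _ _ _ _ _ hse, ← hmid]
      rcases lt_trichotomy (fsum (a0 :: rest) mid) k with hc | hc | hc
      · rw [if_pos hc]
        apply ih (mid + 1) end_ mid (by omega) (by omega) h2 (by omega) ?_ hhigh (Or.inl (by omega))
        intro m hm hmlt
        by_cases h' : m < start
        · exact hlow m hm h'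
        · have := fsum_mono (a0 :: rest) (show m ≤ mid by omega)
          omega
      · rw [if_neg (by omega), if_neg (by omega)]
        refine ⟨by omega, by omega, by omega, ?_⟩
        intro m hmm hmle
        have := fsum_strict (a0 :: rest) (show a0 ∈ a0 :: rest by simp)
          (show a0 ≤ mid by omega) hmm
        omega
      · rw [if_neg (by omega), if_pos hc]
        apply ih start (mid - 1) temp (by omega) h1 (by omega) (by omega) hlow ?_ htemp
        intro m hm1' hm2'
        by_cases h' : end_ < m
        · exact hhigh m h' hm2'
        · have := fsum_mono (a0 :: rest) (show mid ≤ m by omega)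
          omega
    · rw [hotsLoopA_stop _ _ _ _ _ _ hse]
      exact loopA_exit a0 rest k start end_ temp hk hf0 h1 h2 h3 hlow hhigh htemp hse

theorem countLess_succ (a : List Int) (m : Int) (n : Nat) (lo hi : Int) (h : lo < hi) :
    countLess a m (n + 1) lo hi =
      (if PySem.List.pyGetD a (PySem.Int.floordiv (lo + hi) 2) 0 < m then
        countLess a m n (PySem.Int.floordiv (lo + hi) 2 + 1) hi
      else countLess a m n lo (PySem.Int.floordiv (lo + hi) 2)) := by
  simp [countLess, h]

theorem countLess_stop (a : List Int) (m : Int) (n : Nat) (lo hi : Int) (h : ¬ lo < hi) :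
    countLess a m n lo hi = lo := by
  cases n <;> simp [countLess, h]

theorem countLess_spec (a : List Int) (m : Int) (ha : a.Pairwise (· ≤ ·)) :
    ∀ (n : Nat) (lo hi : Int), (hi - lo).toNat ≤ n →
      0 ≤ lo → lo ≤ hi → hi ≤ (a.length : Int) →
      (∀ (i : Nat) (h : i < a.length), (i : Int) < lo → a[i] < m) →
      (∀ (i : Nat) (h : i < a.length), hi ≤ (i : Int) → m ≤ a[i]) →
      0 ≤ countLess a m n lo hi ∧ countLess a m n lo hi ≤ (a.length : Int) ∧
      (∀ (i : Nat) (h : i < a.length), (i : Int) < countLess a m n lo hi → a[i] < m) ∧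
      (∀ (i : Nat) (h : i < a.length), countLess a m n lo hi ≤ (i : Int) → m ≤ a[i]) := by
  have hmono : ∀ (i j : Nat) (hi' : i < a.length) (hj : j < a.length), i ≤ j → a[i] ≤ a[j] := by
    intro i j hi' hj hij
    rcases Nat.lt_or_eq_of_le hij with hlt | heq
    · exact List.pairwise_iff_getElem.mp ha i j hi' hj hlt
    · subst heq; exact le_refl _
  intro n
  induction n with
  | zero =>
    intro lo hi hn h0 hlh hhn hlowi hhighi
    have h : ¬ lo < hi := by omega
    rw [countLess_stop a m 0 lo hi h]
    exact ⟨h0, by omega, fun i hi' hlt => hlowi i hi' hlt,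
      fun i hi' hge => hhighi i hi' (by omega)⟩
  | succ n ih =>
    intro lo hi hn h0 hlh hhn hlowi hhighi
    by_cases h : lo < hi
    · have hfd : PySem.Int.floordiv (lo + hi) 2 = (lo + hi) / 2 :=
        PySem.Int.floordiv_eq_ediv_of_pos (by omega)
      set mid := PySem.Int.floordiv (lo + hi) 2 with hmd
      have hb1 : lo ≤ mid := by omega
      have hb2 : mid < hi := by omega
      have hmr : mid.toNat < a.length := by omega
      have hget : PySem.List.pyGetD a mid 0 = a[mid.toNat] :=
        PySem.List.pyGetD_eq_getElem a 0 (by omega) (by omega)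
      rw [countLess_succ a m n lo hi h, ← hmd, hget]
      by_cases hc : a[mid.toNat] < m
      · rw [if_pos hc]
        apply ih (mid + 1) hi (by omega) (by omega) (by omega) hhn ?_ hhighi
        intro i hi' hilt
        exact lt_of_le_of_lt (hmono i mid.toNat hi' hmr (by omega)) hc
      · rw [if_neg hc]
        apply ih lo mid (by omega) h0 (by omega) (by omega) hlowi ?_
        intro i hi' hge
        exact le_trans (by omega : m ≤ a[mid.toNat]) (hmono mid.toNat i hmr hi' (by omega))
    · rw [countLess_stop a m (n + 1) lo hi h]
      exact ⟨h0, by omega, fun i hi' hlt => hlowi i hi' hlt,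
        fun i hi' hge => hhighi i hi' (by omega)⟩

-- the prefix-sum list B builds by folding append
def presFrom : List Int → Int → List Int
  | [], _ => []
  | x :: t, s => (s + x) :: presFrom t (s + x)

theorem foldl_pre (a : List Int) : ∀ (p : List Int) (s : Int) (hp : p ≠ []),
    p.getLast hp = s →
    a.foldl (fun p x => p ++ [PySem.List.pyGetD p (-1) 0 + x]) p = p ++ presFrom a s := by
  induction a with
  | nil => intro p s hp hl; simp [presFrom]
  | cons x t ih =>
    intro p s hp hl
    simp only [List.foldl_cons]
    have hstep : PySem.List.pyGetD p (-1) 0 = s := by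
      rw [PySem.List.pyGetD_neg_one p 0 hp, hl]
    rw [hstep, ih (p ++ [s + x]) (s + x) (by simp) (by simp), presFrom]
    simp

theorem length_presFrom (a : List Int) : ∀ s, (presFrom a s).length = a.length := by
  induction a with
  | nil => intro s; rfl
  | cons x t ih => intro s; simp [presFrom, ih]

theorem presFrom_getElem (a : List Int) : ∀ (c : Nat) (s : Int) (h : c < (s :: presFrom a s).length),
    (s :: presFrom a s)[c] = s + ((a.take c).sum) := by
  induction a with
  | nil =>
    intro c s h
    simp only [presFrom, List.length_cons, List.length_nil] at h
    have : c = 0 := by omega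
    subst this
    simp
  | cons x t ih =>
    intro c s h
    cases c with
    | zero => simp
    | succ c' =>
      simp only [presFrom, List.length_cons] at h ⊢
      rw [List.getElem_cons_succ]
      have hlen : c' < ((s + x) :: presFrom t (s + x)).length := by
        simp only [List.length_cons, length_presFrom] at h ⊢
        omega
      rw [ih c' (s + x) hlen, List.take_succ_cons]
      simp
      ring

theorem distSumB_eq (a : List Int) (m : Int) (ha : a.Pairwise (· ≤ ·)) :
    distSumB a (a.foldl (fun p x => p ++ [PySem.List.pyGetD p (-1) 0 + x]) [0])
      (a.length : Int) m = fsum a m := by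
  have hfold := foldl_pre a [0] 0 (by simp) (by simp)
  obtain ⟨hc0, hcl, hlt, hge⟩ := countLess_spec a m ha a.length 0
    (a.length : Int) (by omega) (le_refl 0) (by omega) (le_refl _)
    (fun i hi' h' => absurd h' (by omega)) (fun i hi' h' => absurd h' (by omega))
  set c := countLess a m a.length 0 (a.length : Int) with hcdef
  unfold distSumB
  rw [hfold]
  show c * m - PySem.List.pyGetD ([0] ++ presFrom a 0) c 0 = fsum a m
  have hcnat : (c.toNat : Int) = c := Int.toNat_of_nonneg hc0
  have hpg : PySem.List.pyGetD ([0] ++ presFrom a 0) c 0 = (0 : Int) + (a.take c.toNat).sum := by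
    rw [PySem.List.pyGetD_eq_getElem _ 0 hc0 (by simp [length_presFrom]; omega)]
    exact presFrom_getElem a c.toNat 0 (by simp [length_presFrom]; omega)
  rw [hpg]
  have hsplit : fsum a m = fsum (a.take c.toNat) m + fsum (a.drop c.toNat) m := by
    rw [← fsum_append, List.take_append_drop]
  have h1 : fsum (a.take c.toNat) m = ((a.take c.toNat).length : Int) * m - (a.take c.toNat).sum := by
    apply fsum_all_lt
    intro x hx
    obtain ⟨i, hi', heq⟩ := List.mem_iff_getElem.mp hx
    have hil : i < a.length := by
      have := hi'; simp only [List.length_take] at this; omega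
    rw [← heq, List.getElem_take]
    apply hlt i hil
    have := hi'; simp only [List.length_take] at this; omega
  have h2 : fsum (a.drop c.toNat) m = 0 := by
    apply fsum_zero
    intro x hx
    obtain ⟨i, hi', heq⟩ := List.mem_iff_getElem.mp hx
    have hil : c.toNat + i < a.length := by
      have := hi'; simp only [List.length_drop] at this; omega
    rw [← heq, List.getElem_drop]
    apply hge (c.toNat + i) hil (by omega)
  have hlen : ((a.take c.toNat).length : Int) = c := by
    simp only [List.length_take]
    omega
  rw [hsplit, h1, h2, hlen]
  ring

theorem hotsLoopB_succ (a pre : List Int) (n k : Int) (f : Nat) (lo hi : Int) (h : lo < hi) :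
    hotsLoopB a pre n k (f + 1) lo hi =
      (if distSumB a pre n (PySem.Int.floordiv (lo + hi + 1) 2) ≤ k then
        hotsLoopB a pre n k f (PySem.Int.floordiv (lo + hi + 1) 2) hi
      else hotsLoopB a pre n k f lo (PySem.Int.floordiv (lo + hi + 1) 2 - 1)) := by
  simp [hotsLoopB, h]

theorem hotsLoopB_stop (a pre : List Int) (n k : Int) (f : Nat) (lo hi : Int) (h : ¬ lo < hi) :
    hotsLoopB a pre n k f lo hi = lo := by
  cases f <;> simp [hotsLoopB, h]

theorem loopB_isAns (a pre : List Int) (n : Int) (a0 k : Int)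
    (hds : ∀ m, distSumB a pre n m = fsum a m) :
    ∀ (fuel : Nat) (lo hi : Int), (hi - lo).toNat ≤ fuel →
      a0 ≤ lo → lo ≤ hi → hi ≤ a0 + k → fsum a lo ≤ k →
      (∀ m, hi < m → m ≤ a0 + k → k < fsum a m) →
      IsAns a a0 k (hotsLoopB a pre n k fuel lo hi) := by
  intro fuel
  induction fuel with
  | zero =>
    intro lo hi hf h1 h2 h3 h4 h5
    have h : ¬ lo < hi := by omega
    rw [hotsLoopB_stop _ _ _ _ _ _ _ h]
    exact ⟨h1, by omega, h4, fun m hm1 hm2 => h5 m (by omega) hm2⟩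
  | succ f ih =>
    intro lo hi hf h1 h2 h3 h4 h5
    by_cases h : lo < hi
    · have hfd : PySem.Int.floordiv (lo + hi + 1) 2 = (lo + hi + 1) / 2 :=
        PySem.Int.floordiv_eq_ediv_of_pos (by omega)
      set mid := PySem.Int.floordiv (lo + hi + 1) 2 with hmd
      have hb1 : lo < mid := by omega
      have hb2 : mid ≤ hi := by omega
      rw [hotsLoopB_succ _ _ _ _ _ _ _ h, ← hmd, hds mid]
      by_cases hc : fsum a mid ≤ k
      · rw [if_pos hc]
        exact ih mid hi (by omega) (by omega) (by omega) h3 hc h5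
      · rw [if_neg hc]
        apply ih lo (mid - 1) (by omega) h1 (by omega) (by omega) h4 ?_
        intro m hm1 hm2
        by_cases hmh : hi < m
        · exact h5 m hmh hm2
        · have := fsum_mono a (show mid ≤ m by omega)
          omega
    · rw [hotsLoopB_stop _ _ _ _ _ _ _ h]
      exact ⟨h1, by omega, h4, fun m hm1 hm2 => h5 m (by omega) hm2⟩

-- ===== VERDICT (by name: the statement is the Claim_ definition above) =====
theorem hots_spec : Claim_equal_hots := by
  intro arr k _hdom hpre
  obtain ⟨hne, hk⟩ := hpre
  unfold Spec_hots
  set a := PySem.List.sorted arr (fun x => x) false with hadef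
  have hane : a ≠ [] := by
    rw [hadef]
    intro hnil
    exact hne ((PySem.List.sorted_eq_nil_iff arr (fun x => x) false).mp hnil)
  obtain ⟨a0, rest, hcons⟩ := List.exists_cons_of_ne_nil hane
  have ha : a.Pairwise (· ≤ ·) := by
    have := PySem.List.sorted_pairwise (xs := arr) (key := fun x => x)
    rw [hadef]
    simpa using this
  have hget0 : PySem.List.pyGetD a 0 0 = a0 := by
    rw [hcons]
    exact PySem.List.pyGetD_zero_cons a0 rest 0
  have hmin : ∀ x ∈ a, a0 ≤ x := by
    intro x hx
    rw [hcons] at hx ha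
    rcases List.mem_cons.mp hx with h | h
    · exact h ▸ le_refl _
    · exact (List.pairwise_cons.mp ha).1 x h
  have hf0 : fsum a a0 = 0 := fsum_zero _ _ hmin
  have hA : hots arr k = hotsLoopA a k (k + 1).toNat (PySem.List.pyGetD a 0 0) (PySem.List.pyGetD a 0 0 + k) 0 := rfl
  have hB : hots_alt arr k =
      hotsLoopB a (a.foldl (fun p x => p ++ [PySem.List.pyGetD p (-1) 0 + x]) [0])
        (a.length : Int) k k.toNat (PySem.List.pyGetD a 0 0)
        (PySem.List.pyGetD a 0 0 + k) := rfl
  have hAns1 : IsAns a a0 k (hots arr k) := by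
    rw [hA, hget0, hcons]
    apply loopA_isAns a0 rest k (hcons ▸ ha) hk (k + 1).toNat a0 (a0 + k) 0 (by omega)
      (le_refl _) (le_refl _) (by omega)
      (fun m hm1 hm2 => absurd hm2 (by omega))
      (fun m hm1 hm2 => absurd hm2 (by omega))
      (Or.inr ⟨rfl, rfl⟩)
  have hAns2 : IsAns a a0 k (hots_alt arr k) := by
    rw [hB, hget0]
    apply loopB_isAns a _ _ a0 k (fun m => distSumB_eq a m ha) k.toNat a0 (a0 + k) (by omega)
      (le_refl _) (by omega) (le_refl _) (by omega)
      (fun m hm1 hm2 => absurd hm2 (by omega))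
  exact IsAns_unique hAns1 hAns2
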